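-- pv_equiv track=rewrite | github.com/Adrien-Meilac/PDF-to-Excel | Quadrillage.py | valeurs_frequence_minimum
-- ===== SOURCE A (Python) =====
-- def valeurs_frequence_minimum(V, S, seuil):
--     Imin = []
--     for i in range(len(S)):
--         if S[i] <= seuil:
--             Imin.append(i)
--
--     val = []
--     fait = lambda i: False
--     for i in range(len(Imin)):
--         if not fait(i):
--             M = Imin[i]
--             j = i
--             while j < len(Imin) and M + j - i == Imin[j]:
--                 j += 1
--             val.append(V[Imin[(i+j)//2]])
--             fait = lambda i: i < j
--     return val
-- ===== SOURCE B (Python) =====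
-- def valeurs_frequence_minimum(V, S, seuil):
--     val = []
--     start = None
--     for i in range(len(S)):
--         if S[i] <= seuil:
--             if start is None:
--                 start = i
--         elif start is not None:
--             val.append(V[start + (i - start) // 2])
--             start = None
--     if start is not None:
--         val.append(V[start + (len(S) - start) // 2])
--     return val
-- ===== Notes on version B (the rewrite author's own statement) =====
-- stated objective: simpler
-- what changed: Replaces A's two-phase algorithm (first build the list Imin of all below-threshold indices, then re-scan Imin with a mutable `fait` closure and an inner while loop to delimit each consecutive segment) by a single left-to-right pass over S that keeps only the start index of the current below-threshold run and emits V[start + (end - start)//2] when the run closes.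
import Mathlib
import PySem

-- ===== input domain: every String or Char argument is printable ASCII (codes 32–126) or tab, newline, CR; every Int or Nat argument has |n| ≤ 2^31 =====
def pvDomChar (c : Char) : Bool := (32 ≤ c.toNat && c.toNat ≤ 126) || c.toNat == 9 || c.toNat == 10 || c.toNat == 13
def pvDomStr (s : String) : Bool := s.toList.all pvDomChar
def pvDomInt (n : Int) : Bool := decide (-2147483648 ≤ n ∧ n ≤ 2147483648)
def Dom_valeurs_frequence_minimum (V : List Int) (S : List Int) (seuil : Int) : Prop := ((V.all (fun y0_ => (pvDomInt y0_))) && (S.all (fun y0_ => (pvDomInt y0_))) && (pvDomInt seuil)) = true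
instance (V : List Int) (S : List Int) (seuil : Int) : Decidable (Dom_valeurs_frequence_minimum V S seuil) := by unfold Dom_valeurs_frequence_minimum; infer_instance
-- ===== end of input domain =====

-- B replaces A's two-phase scheme (collect below-threshold indices, then re-scan them with a
-- mutable `fait` closure and an inner while) by one left-to-right pass over S that tracks the
-- start of the current below-threshold run; objective: simpler.

-- ===== PORT A =====
-- Loop indices are nonnegative throughout A, so `range` loops are ported over Nat indices;
-- `S[i]`/`Imin[k]` reads are in range wherever A does not raise, ported as `getD _ 0`
-- (exact there; the out-of-range `V[...]` reads, where Python raises IndexError, are excluded by Pre_).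

-- the `while j < len(Imin) and M + j - i == Imin[j]: j += 1` loop, returning the final j
def vfm_while (Imin : List Nat) (M i j : Nat) : Nat :=
  if h : j < Imin.length ∧ M + (j - i) = Imin.getD j 0 then vfm_while Imin M i (j + 1) else j
termination_by Imin.length - j
decreasing_by omega

-- one iteration of A's second loop; the closure `fait = lambda i: i < j` is represented by
-- its captured value j (the initial `lambda i: False` is j = 0, as the tested i are ≥ 0)
def vfm_step2 (V : List Int) (Imin : List Nat) (st : List Int × Nat) (i : Nat) : List Int × Nat :=
  if i < st.2 then st
  else
    let M := Imin.getD i 0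
    let j := vfm_while Imin M i i
    (st.1 ++ [V.getD (Imin.getD ((i + j) / 2) 0) 0], j)

def valeurs_frequence_minimum (V : List Int) (S : List Int) (seuil : Int) : List Int :=
  let Imin := (List.range S.length).foldl
    (fun acc i => if S.getD i 0 ≤ seuil then acc ++ [i] else acc) ([] : List Nat)
  ((List.range Imin.length).foldl (vfm_step2 V Imin) ([], 0)).1

-- ===== PORT B =====
-- one iteration of B's single loop over S, state = (val, start)
def vfm_alt_step (V S : List Int) (seuil : Int) (st : List Int × Option Nat) (i : Nat) :
    List Int × Option Nat :=
  if S.getD i 0 ≤ seuil then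
    match st.2 with
    | none => (st.1, some i)
    | some _ => st
  else
    match st.2 with
    | none => st
    | some p => (st.1 ++ [V.getD (p + (i - p) / 2) 0], none)

def valeurs_frequence_minimum_alt (V : List Int) (S : List Int) (seuil : Int) : List Int :=
  let r := (List.range S.length).foldl (vfm_alt_step V S seuil) ([], none)
  match r.2 with
  | none => r.1
  | some p => r.1 ++ [V.getD (p + (S.length - p) / 2) 0]

-- ===== PRECONDITION & SPEC =====
-- Pre_ excludes exactly the inputs on which A raises IndexError: those where the midpoint of some
-- maximal below-threshold run of S is not a valid index of V (B raises there too).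
def Pre_valeurs_frequence_minimum (V : List Int) (S : List Int) (seuil : Int) : Prop :=
  ∀ p : Nat, p < S.length → ∀ q : Nat, q < S.length + 1 → p < q →
    (∀ t : Nat, t < q → p ≤ t → S.getD t 0 ≤ seuil) →
    (p = 0 ∨ ¬ S.getD (p - 1) 0 ≤ seuil) →
    (q = S.length ∨ ¬ S.getD q 0 ≤ seuil) →
    p + (q - p) / 2 < V.length

instance (V : List Int) (S : List Int) (seuil : Int) :
    Decidable (Pre_valeurs_frequence_minimum V S seuil) := by
  unfold Pre_valeurs_frequence_minimum
  exact @Nat.decidableBallLT _ _ (fun _ _ => @Nat.decidableBallLT _ _ (fun _ _ => inferInstance))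

def pvWitness_valeurs_frequence_minimum : List Int × List Int × Int := ([5, 7, 9], [0, 3, 0], 1)

def Spec_valeurs_frequence_minimum (V : List Int) (S : List Int) (seuil : Int) (out : List Int) : Prop := out = valeurs_frequence_minimum_alt V S seuil
instance (V : List Int) (S : List Int) (seuil : Int) (out : List Int) : Decidable (Spec_valeurs_frequence_minimum V S seuil out) := by unfold Spec_valeurs_frequence_minimum; infer_instance

-- ===== CLAIM (what is proved, stated in full; the proofs are below) =====
def Claim_equal_valeurs_frequence_minimum : Prop := ∀ (V : List Int) (S : List Int) (seuil : Int), Dom_valeurs_frequence_minimum V S seuil → Pre_valeurs_frequence_minimum V S seuil → Spec_valeurs_frequence_minimum V S seuil (valeurs_frequence_minimum V S seuil)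

-- ===== LEMMAS AND PROOFS =====

-- `specEnd S seuil q` = end (exclusive) of the below-threshold run starting at q
def specEnd (S : List Int) (seuil : Int) (q : Nat) : Nat :=
  if h : q < S.length ∧ S.getD q 0 ≤ seuil then specEnd S seuil (q + 1) else q
termination_by S.length - q
decreasing_by omega

lemma specEnd_step {S : List Int} {seuil : Int} {q : Nat}
    (h : q < S.length ∧ S.getD q 0 ≤ seuil) : specEnd S seuil q = specEnd S seuil (q + 1) := by
  rw [specEnd, dif_pos h]

lemma specEnd_stop {S : List Int} {seuil : Int} {q : Nat}
    (h : ¬ (q < S.length ∧ S.getD q 0 ≤ seuil)) : specEnd S seuil q = q := by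
  rw [specEnd, dif_neg h]

lemma specEnd_ge (S : List Int) (seuil : Int) (q : Nat) : q ≤ specEnd S seuil q := by
  fun_induction specEnd S seuil q with
  | case1 q h ih => omega
  | case2 q h => omega

lemma specEnd_le (S : List Int) (seuil : Int) (q : Nat) (hq : q ≤ S.length) :
    specEnd S seuil q ≤ S.length := by
  fun_induction specEnd S seuil q with
  | case1 q h ih => exact ih (by omega)
  | case2 q h => omega

lemma specEnd_run (S : List Int) (seuil : Int) (q : Nat) :
    ∀ x, q ≤ x → x < specEnd S seuil q → x < S.length ∧ S.getD x 0 ≤ seuil := by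
  fun_induction specEnd S seuil q with
  | case1 q h ih =>
      intro x hx1 hx2
      rcases Nat.eq_or_lt_of_le hx1 with rfl | h2
      · exact h
      · exact ih x h2 hx2
  | case2 q h => intro x h1 h2; omega

lemma specEnd_final (S : List Int) (seuil : Int) (q : Nat) :
    ¬ (specEnd S seuil q < S.length ∧ S.getD (specEnd S seuil q) 0 ≤ seuil) := by
  fun_induction specEnd S seuil q with
  | case1 q h ih => exact ih
  | case2 q h => exact h

-- the run-wise specification both ports are reduced to
def spec (V S : List Int) (seuil : Int) (p : Nat) : List Int :=
  if hp : p < S.length then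
    if hb : S.getD p 0 ≤ seuil then
      V.getD (p + (specEnd S seuil p - p) / 2) 0 :: spec V S seuil (specEnd S seuil p)
    else spec V S seuil (p + 1)
  else []
termination_by S.length - p
decreasing_by
  · have h1 := specEnd_step (S := S) (seuil := seuil) ⟨hp, hb⟩
    have h2 := specEnd_ge S seuil (p + 1)
    omega
  · omega

lemma spec_stop {V S : List Int} {seuil : Int} {p : Nat} (hp : ¬ p < S.length) :
    spec V S seuil p = [] := by rw [spec, dif_neg hp]

lemma spec_skip {V S : List Int} {seuil : Int} {p : Nat} (hp : p < S.length)
    (hb : ¬ S.getD p 0 ≤ seuil) : spec V S seuil p = spec V S seuil (p + 1) := by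
  rw [spec, dif_pos hp, dif_neg hb]

lemma spec_hit {V S : List Int} {seuil : Int} {p : Nat} (hp : p < S.length)
    (hb : S.getD p 0 ≤ seuil) :
    spec V S seuil p =
      V.getD (p + (specEnd S seuil p - p) / 2) 0 :: spec V S seuil (specEnd S seuil p) := by
  rw [spec, dif_pos hp, dif_pos hb]

-- ===== B side =====

def finishB (V S : List Int) (r : List Int × Option Nat) : List Int :=
  match r.2 with
  | none => r.1
  | some p => r.1 ++ [V.getD (p + (S.length - p) / 2) 0]

def specFrom (V S : List Int) (seuil : Int) (st : Option Nat) (i : Nat) : List Int :=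
  match st with
  | none => spec V S seuil i
  | some p => V.getD (p + (specEnd S seuil i - p) / 2) 0 :: spec V S seuil (specEnd S seuil i)

lemma B_main (V S : List Int) (seuil : Int) :
    ∀ k i (val : List Int) (st : Option Nat), S.length - i = k → i ≤ S.length →
    finishB V S ((List.range' i (S.length - i)).foldl (vfm_alt_step V S seuil) (val, st)) =
      val ++ specFrom V S seuil st i := by
  intro k
  induction k with
  | zero =>
      intro i val st hk hi
      have hi' : i = S.length := by omega
      subst hi'
      rw [hk]
      simp only [List.range'_zero, List.foldl_nil]
      cases st with
      | none => simp [finishB, specFrom, spec_stop (by omega : ¬ S.length < S.length)]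
      | some p =>
          simp [finishB, specFrom,
                specEnd_stop (by omega : ¬ (S.length < S.length ∧ S.getD S.length 0 ≤ seuil)),
                spec_stop (by omega : ¬ S.length < S.length)]
  | succ k ih =>
      intro i val st hk hi
      have hi' : i < S.length := by omega
      rw [hk, List.range'_succ, List.foldl_cons]
      have hk' : S.length - (i + 1) = k := by omega
      by_cases hb : S.getD i 0 ≤ seuil
      · cases st with
        | none =>
            have hstep : vfm_alt_step V S seuil (val, none) i = (val, some i) := by
              simp only [vfm_alt_step, if_pos hb]
            rw [hstep]
            have hih := ih (i + 1) val (some i) hk' (by omega)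
            rw [hk'] at hih
            rw [hih]
            simp only [specFrom]
            rw [spec_hit hi' hb, specEnd_step ⟨hi', hb⟩]
        | some p =>
            have hstep : vfm_alt_step V S seuil (val, some p) i = (val, some p) := by
              simp only [vfm_alt_step, if_pos hb]
            rw [hstep]
            have hih := ih (i + 1) val (some p) hk' (by omega)
            rw [hk'] at hih
            rw [hih]
            simp only [specFrom]
            rw [specEnd_step ⟨hi', hb⟩]
      · cases st with
        | none =>
            have hstep : vfm_alt_step V S seuil (val, none) i = (val, none) := by
              simp only [vfm_alt_step, if_neg hb]
            rw [hstep]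
            have hih := ih (i + 1) val none hk' (by omega)
            rw [hk'] at hih
            rw [hih]
            simp only [specFrom]
            rw [spec_skip hi' hb]
        | some p =>
            have hstep : vfm_alt_step V S seuil (val, some p) i =
                (val ++ [V.getD (p + (i - p) / 2) 0], none) := by
              simp only [vfm_alt_step, if_neg hb]
            rw [hstep]
            have hih := ih (i + 1) (val ++ [V.getD (p + (i - p) / 2) 0]) none hk' (by omega)
            rw [hk'] at hih
            rw [hih]
            simp only [specFrom]
            rw [specEnd_stop (q := i) (by tauto), spec_skip hi' hb]
            simp

lemma B_spec (V S : List Int) (seuil : Int) :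
    valeurs_frequence_minimum_alt V S seuil = spec V S seuil 0 := by
  have h0 : valeurs_frequence_minimum_alt V S seuil =
      finishB V S ((List.range S.length).foldl (vfm_alt_step V S seuil) ([], none)) := rfl
  rw [h0, List.range_eq_range',
      show List.range' 0 S.length = List.range' 0 (S.length - 0) from by rw [Nat.sub_zero]]
  rw [B_main V S seuil (S.length - 0) 0 [] none rfl (by omega)]
  simp [specFrom]

-- ===== A side =====

lemma while_ge (Imin : List Nat) (M i j : Nat) : j ≤ vfm_while Imin M i j := by
  fun_induction vfm_while Imin M i j with
  | case1 j h ih => omega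
  | case2 j h => omega

lemma while_le (Imin : List Nat) (M i j : Nat) (hj : j ≤ Imin.length) :
    vfm_while Imin M i j ≤ Imin.length := by
  fun_induction vfm_while Imin M i j with
  | case1 j h ih => exact ih (by omega)
  | case2 j h => omega

-- the segment-jumping recursion A's second loop implements
def procA (V : List Int) (Imin : List Nat) (i : Nat) : List Int :=
  if h : i < Imin.length then
    let j := vfm_while Imin (Imin.getD i 0) i i
    V.getD (Imin.getD ((i + j) / 2) 0) 0 :: procA V Imin j
  else []
termination_by Imin.length - i
decreasing_by
  have h1 : vfm_while Imin (Imin.getD i 0) i i = vfm_while Imin (Imin.getD i 0) i (i + 1) := by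
    rw [vfm_while, dif_pos ⟨h, by omega⟩]
  have h2 := while_ge Imin (Imin.getD i 0) i (i + 1)
  have h3 := while_le Imin (Imin.getD i 0) i i (by omega)
  omega

lemma A_skip (V : List Int) (Imin : List Nat) :
    ∀ d i j (val : List Int), i ≤ j → j - i = d → j ≤ Imin.length →
    (List.range' i (Imin.length - i)).foldl (vfm_step2 V Imin) (val, j) =
      (List.range' j (Imin.length - j)).foldl (vfm_step2 V Imin) (val, j) := by
  intro d
  induction d with
  | zero =>
      intro i j val h1 h2 h3
      have : i = j := by omega
      subst this; rfl
  | succ d ih =>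
      intro i j val h1 h2 h3
      have hi : i < Imin.length := by omega
      rw [show Imin.length - i = (Imin.length - (i + 1)) + 1 from by omega,
          List.range'_succ, List.foldl_cons]
      have hstep : vfm_step2 V Imin (val, j) i = (val, j) := by
        simp only [vfm_step2]
        rw [if_pos (show i < (val, j).2 from by omega)]
      rw [hstep]
      exact ih (i + 1) j val (by omega) (by omega) h3

lemma A_main (V : List Int) (Imin : List Nat) :
    ∀ k i (val : List Int), Imin.length - i = k → i ≤ Imin.length →
    ((List.range' i (Imin.length - i)).foldl (vfm_step2 V Imin) (val, i)).1 =
      val ++ procA V Imin i := by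
  intro k
  induction k using Nat.strong_induction_on with
  | _ k ih =>
  intro i val hk hi
  by_cases h : i < Imin.length
  · rw [show Imin.length - i = (Imin.length - (i + 1)) + 1 from by omega,
        List.range'_succ, List.foldl_cons]
    have hj1 : i + 1 ≤ vfm_while Imin (Imin.getD i 0) i i := by
      have h0 : vfm_while Imin (Imin.getD i 0) i i = vfm_while Imin (Imin.getD i 0) i (i + 1) := by
        rw [vfm_while, dif_pos ⟨h, by omega⟩]
      rw [h0]
      exact while_ge Imin (Imin.getD i 0) i (i + 1)
    have hj2 : vfm_while Imin (Imin.getD i 0) i i ≤ Imin.length :=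
      while_le Imin (Imin.getD i 0) i i (by omega)
    have hstep : vfm_step2 V Imin (val, i) i =
        (val ++ [V.getD (Imin.getD ((i + vfm_while Imin (Imin.getD i 0) i i) / 2) 0) 0],
         vfm_while Imin (Imin.getD i 0) i i) := by
      simp only [vfm_step2]
      rw [if_neg (show ¬ i < (val, i).2 from by omega)]
    rw [hstep]
    rw [A_skip V Imin (vfm_while Imin (Imin.getD i 0) i i - (i + 1)) (i + 1)
          (vfm_while Imin (Imin.getD i 0) i i) _ hj1 (by omega) hj2]
    rw [ih (Imin.length - vfm_while Imin (Imin.getD i 0) i i) (by omega)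
          (vfm_while Imin (Imin.getD i 0) i i) _ rfl hj2]
    conv_rhs => rw [procA]
    rw [dif_pos h]
    simp
  · rw [show Imin.length - i = 0 from by omega]
    simp only [List.range'_zero, List.foldl_nil]
    rw [procA, dif_neg h]
    simp

lemma A_spec (V S : List Int) (seuil : Int) :
    valeurs_frequence_minimum V S seuil =
      procA V ((List.range S.length).filter (fun i => decide (S.getD i 0 ≤ seuil))) 0 := by
  have hfun : (fun (acc : List Nat) i => if S.getD i 0 ≤ seuil then acc ++ [i] else acc) =
      (fun (acc : List Nat) i =>
        if (fun i => decide (S.getD i 0 ≤ seuil)) i = true then acc ++ [id i] else acc) := by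
    funext acc i
    simp
  simp only [valeurs_frequence_minimum]
  rw [hfun, PySem.List.foldl_append_if]
  simp only [List.nil_append, List.map_id]
  generalize (List.range S.length).filter (fun i => decide (S.getD i 0 ≤ seuil)) = Imin
  rw [List.range_eq_range',
      show List.range' 0 Imin.length = List.range' 0 (Imin.length - 0) from by rw [Nat.sub_zero]]
  rw [A_main V Imin (Imin.length - 0) 0 [] rfl (by omega)]
  simp

-- ===== bridge =====

lemma bridge (V S : List Int) (seuil : Int) :
    ∀ k q, S.length - q = k → q ≤ S.length →
    spec V S seuil q =
      procA V ((List.range S.length).filter (fun i => decide (S.getD i 0 ≤ seuil)))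
        (((List.range q).filter (fun i => decide (S.getD i 0 ≤ seuil))).length) := by
  intro k
  induction k using Nat.strong_induction_on with
  | _ k ih =>
  intro q hk hq
  by_cases hqn : q < S.length
  · by_cases hb : S.getD q 0 ≤ seuil
    · -- below-threshold run starting at q
      have hge : q + 1 ≤ specEnd S seuil q := by
        rw [specEnd_step ⟨hqn, hb⟩]; exact specEnd_ge S seuil (q + 1)
      have hle : specEnd S seuil q ≤ S.length := specEnd_le S seuil q (by omega)
      have hrun : ∀ x, q ≤ x → x < specEnd S seuil q → S.getD x 0 ≤ seuil :=
        fun x h1 h2 => (specEnd_run S seuil q x h1 h2).2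
      have hfin := specEnd_final S seuil q
      set bl : Nat → Bool := fun i => decide (S.getD i 0 ≤ seuil) with hbl
      set r := specEnd S seuil q with hr
      set C := (List.range q).filter bl with hC
      set D := (List.range' r (S.length - r)).filter bl with hD
      set i := C.length with hi
      have hfq : (List.range' q (r - q)).filter bl = List.range' q (r - q) := by
        rw [List.filter_eq_self]
        intro a ha
        rw [List.mem_range'_1] at ha
        simp only [hbl, decide_eq_true_eq]
        exact hrun a ha.1 (by omega)
      have e1 : List.range' 0 q ++ List.range' q (S.length - q) = List.range' 0 S.length := by
        have h' := List.range'_append (s := 0) (m := q) (n := S.length - q) (step := 1)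
        simp only [Nat.zero_add, Nat.one_mul] at h'
        rw [show q + (S.length - q) = S.length from by omega] at h'
        exact h'
      have e2 : List.range' q (r - q) ++ List.range' r (S.length - r)
          = List.range' q (S.length - q) := by
        have h' := List.range'_append (s := q) (m := r - q) (n := S.length - r) (step := 1)
        rw [show q + 1 * (r - q) = r from by omega,
            show r - q + (S.length - r) = S.length - q from by omega] at h'
        exact h'
      have hsplit : (List.range S.length).filter bl = C ++ (List.range' q (r - q) ++ D) := by
        rw [List.range_eq_range', ← e1, ← e2]
        rw [List.filter_append, List.filter_append, hfq]
        rw [hC, hD, List.range_eq_range']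
      have hIlen : ((List.range S.length).filter bl).length = i + ((r - q) + D.length) := by
        rw [hsplit]
        simp only [List.length_append, List.length_range']
        omega
      have hget : ∀ t, t < r - q → ((List.range S.length).filter bl).getD (i + t) 0 = q + t := by
        intro t ht
        rw [hsplit, List.getD_append_right C _ 0 (i + t) (by omega),
            show i + t - C.length = t from by omega,
            List.getD_append _ _ 0 t (by simp [List.length_range']; omega),
            List.getD_eq_getElem _ _ (by simp [List.length_range']; omega),
            List.getElem_range']
        omega
      have hwhile : ∀ m t, (r - q) - t = m → t ≤ r - q →
          vfm_while ((List.range S.length).filter bl) q i (i + t) = i + (r - q) := by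
        intro m
        induction m with
        | zero =>
            intro t h1 h2
            have ht : t = r - q := by omega
            subst ht
            rw [vfm_while, dif_neg]
            rintro ⟨c1, c2⟩
            rw [hIlen] at c1
            have hD0 : 0 < D.length := by omega
            have hgD : ((List.range S.length).filter bl).getD (i + (r - q)) 0 = D.getD 0 0 := by
              rw [hsplit, List.getD_append_right C _ 0 (i + (r - q)) (by omega),
                  show i + (r - q) - C.length = r - q from by omega,
                  List.getD_append_right _ _ 0 (r - q) (by simp [List.length_range']),
                  show r - q - (List.range' q (r - q)).length = 0 from by
                    simp [List.length_range']]
            have hmem : D.getD 0 0 ∈ D := by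
              rw [List.getD_eq_getElem D 0 hD0]
              exact List.getElem_mem hD0
            have hmem' : D.getD 0 0 ∈ (List.range' r (S.length - r)).filter bl := hD ▸ hmem
            have hmem2 : D.getD 0 0 ∈ List.range' r (S.length - r) :=
              List.mem_of_mem_filter hmem'
            have hblD : bl (D.getD 0 0) = true := List.of_mem_filter hmem'
            rw [List.mem_range'_1] at hmem2
            have hne : D.getD 0 0 ≠ r := by
              intro he
              rw [he] at hblD
              simp only [hbl, decide_eq_true_eq] at hblD
              exact hfin ⟨by omega, hblD⟩
            rw [hgD] at c2
            omega
        | succ m ihm =>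
            intro t h1 h2
            have ht : t < r - q := by omega
            rw [vfm_while, dif_pos ⟨by rw [hIlen]; omega, by rw [hget t ht]; omega⟩]
            rw [show i + t + 1 = i + (t + 1) from by omega]
            exact ihm (t + 1) (by omega) (by omega)
      have hj : vfm_while ((List.range S.length).filter bl) q i i = i + (r - q) := by
        have h' := hwhile ((r - q) - 0) 0 rfl (by omega)
        rw [Nat.add_zero] at h'
        exact h'
      have hcntr : ((List.range (specEnd S seuil q)).filter bl).length = i + (r - q) := by
        have e3 : List.range' 0 q ++ List.range' q (r - q) = List.range' 0 r := by
          have h' := List.range'_append (s := 0) (m := q) (n := r - q) (step := 1)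
          simp only [Nat.zero_add, Nat.one_mul] at h'
          rw [show q + (r - q) = r from by omega] at h'
          exact h'
        rw [← hr, List.range_eq_range', ← e3, List.filter_append, hfq]
        simp only [List.length_append, List.length_range']
        rw [hi, hC, List.range_eq_range']
      have hi0 : ((List.range S.length).filter bl).getD i 0 = q := by
        have h' := hget 0 (by omega)
        simpa using h'
      rw [spec_hit hqn hb]
      rw [procA, dif_pos (show i < ((List.range S.length).filter bl).length from by
            rw [hIlen]; omega)]
      simp only
      rw [hi0, hj]
      rw [show (i + (i + (r - q))) / 2 = i + (r - q) / 2 from by omega]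
      rw [hget ((r - q) / 2) (by omega)]
      have htail := ih (S.length - specEnd S seuil q) (by omega) (specEnd S seuil q) rfl (by omega)
      rw [htail, hcntr]
    · -- position q is not below threshold: skip it
      set bl : Nat → Bool := fun i => decide (S.getD i 0 ≤ seuil) with hbl
      rw [spec_skip hqn hb]
      have hcnt : ((List.range (q + 1)).filter bl).length = ((List.range q).filter bl).length := by
        have hblq : bl q = false := by
          simp only [hbl, decide_eq_false_iff_not]
          exact hb
        rw [List.range_succ, List.filter_append]
        simp [hblq]
      have h' := ih (S.length - (q + 1)) (by omega) (q + 1) rfl (by omega)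
      rw [h', hcnt]
  · have hqe : q = S.length := by omega
    subst hqe
    rw [spec_stop (by omega)]
    rw [procA, dif_neg (lt_irrefl _)]

-- ===== VERDICT (by name: the statement is the Claim_ definition above) =====
theorem valeurs_frequence_minimum_spec : Claim_equal_valeurs_frequence_minimum := by
  intro V S seuil _ _
  unfold Spec_valeurs_frequence_minimum
  rw [A_spec, B_spec V S seuil, bridge V S seuil (S.length) 0 rfl (by omega)]
  simp
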